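-- pv_equiv track=rewrite | github.com/Queshema123/MIDAS | midas.py | optimize_time_series_split
-- ===== SOURCE A (Python) =====
-- def optimize_time_series_split(n_samples: int, test_size: int) -> tuple:
--     """
--     Подбирает параметры n_splits и max_train_size для TimeSeriesSplit.
--
--     Аргументы:
--         n_samples (int): Общее количество наблюдений.
--         test_size (int): Желаемый размер тестового набора в каждом разбиении.
--
--     Возвращает:
--         tuple: (n_splits, max_train_size)
--     """
--     if test_size <= 0 or test_size >= n_samples:
--         raise ValueError("test_size должен быть > 0 и меньше n_samples.")
--
--     # Рассчитываем n_splits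
--     n_splits = (n_samples - test_size) // test_size
--     n_splits = max(n_splits, 1)  # Минимум 1 разбиение
--
--     # Рассчитываем max_train_size
--     max_train_size = n_samples - test_size * (n_splits + 1)
--
--     # Если max_train_size некорректен, уменьшаем n_splits
--     while max_train_size <= 0 and n_splits > 1:
--         n_splits -= 1
--         max_train_size = n_samples - test_size * (n_splits + 1)
--
--     # Если после коррекции все равно неверно, используем все данные
--     if max_train_size <= 0:
--         max_train_size = None
--
--     return n_splits, max_train_size
-- ===== SOURCE B (Python) =====
-- def optimize_time_series_split(n_samples: int, test_size: int) -> tuple: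
--     if test_size <= 0 or test_size >= n_samples:
--         raise ValueError("test_size должен быть > 0 и меньше n_samples.")
--
--     def feasible(k):
--         # k test windows of size test_size still leave a strictly positive training prefix
--         return n_samples - test_size * (k + 1) > 0
--
--     # binary search for the largest feasible number of splits:
--     # feasible(0) always holds here, feasible(n_samples) never does
--     lo, hi = 0, n_samples
--     while hi - lo > 1:
--         mid = (lo + hi) // 2
--         if feasible(mid):
--             lo = mid
--         else:
--             hi = mid
--
--     if lo == 0:
--         return 1, None
--     return lo, n_samples - test_size * (lo + 1)
-- ===== Notes on version B (the rewrite author's own statement) =====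
-- stated objective: alternative
-- what changed: Replaces A's divide-then-correct arithmetic (floordiv, clamp, while-loop decrement) with a binary search over the feasibility predicate 'k splits still leave a positive training prefix', returning the largest feasible k.
import Mathlib
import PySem

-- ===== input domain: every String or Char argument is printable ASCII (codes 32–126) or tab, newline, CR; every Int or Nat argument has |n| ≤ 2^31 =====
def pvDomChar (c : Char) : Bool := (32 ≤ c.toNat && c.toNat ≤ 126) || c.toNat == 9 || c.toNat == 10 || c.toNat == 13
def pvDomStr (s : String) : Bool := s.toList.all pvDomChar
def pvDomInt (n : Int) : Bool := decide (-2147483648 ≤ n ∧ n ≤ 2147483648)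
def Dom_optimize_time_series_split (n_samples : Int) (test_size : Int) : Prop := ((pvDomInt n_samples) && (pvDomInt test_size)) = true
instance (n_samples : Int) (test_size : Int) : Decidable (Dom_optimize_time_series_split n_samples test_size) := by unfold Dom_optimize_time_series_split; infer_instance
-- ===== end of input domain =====

-- B replaces A's divide-then-correct arithmetic by a binary search for the largest number of
-- splits leaving a positive training prefix (alternative algorithm, same results).

-- ===== PORT A =====
-- the 'while max_train_size <= 0 and n_splits > 1' loop of A, as structural recursion on n_splits
def pvAdjust (n_samples test_size : Int) (n_splits max_train_size : Int) : Int × Int :=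
  if max_train_size ≤ 0 ∧ n_splits > 1 then
    pvAdjust n_samples test_size (n_splits - 1) (n_samples - test_size * ((n_splits - 1) + 1))
  else (n_splits, max_train_size)
termination_by n_splits.toNat
decreasing_by omega

def optimize_time_series_split (n_samples : Int) (test_size : Int) : Int × Option Int :=
  if test_size ≤ 0 ∨ test_size ≥ n_samples then (0, none)  -- Python raises ValueError here; excluded by Pre_
  else
    let n_splits0 := PySem.Int.floordiv (n_samples - test_size) test_size
    let n_splits1 := max n_splits0 1
    let mts0 := n_samples - test_size * (n_splits1 + 1)
    let p := pvAdjust n_samples test_size n_splits1 mts0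
    (p.1, if p.2 ≤ 0 then none else some p.2)

-- ===== PORT B =====
-- Source B's binary-search loop 'while hi - lo > 1: …', as recursion on (hi - lo)
def pvBisect (n_samples test_size : Int) (lo hi : Int) : Int :=
  if _h : hi - lo > 1 then
    let mid := PySem.Int.floordiv (lo + hi) 2
    if 0 < n_samples - test_size * (mid + 1) then pvBisect n_samples test_size mid hi
    else pvBisect n_samples test_size lo mid
  else lo
termination_by (hi - lo).toNat
decreasing_by
  · have h1 := PySem.Int.floordiv_mul_add_mod (lo + hi) 2
    have h2 := PySem.Int.mod_nonneg (lo + hi) (by norm_num : (0:Int) < 2)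
    have h3 := PySem.Int.mod_lt (lo + hi) (by norm_num : (0:Int) < 2)
    omega
  · have h1 := PySem.Int.floordiv_mul_add_mod (lo + hi) 2
    have h2 := PySem.Int.mod_nonneg (lo + hi) (by norm_num : (0:Int) < 2)
    have h3 := PySem.Int.mod_lt (lo + hi) (by norm_num : (0:Int) < 2)
    omega

def optimize_time_series_split_alt (n_samples : Int) (test_size : Int) : Int × Option Int :=
  if test_size ≤ 0 ∨ test_size ≥ n_samples then (0, none)  -- Python raises ValueError here; excluded by Pre_
  else
    let lo := pvBisect n_samples test_size 0 n_samples
    if lo = 0 then (1, none) else (lo, some (n_samples - test_size * (lo + 1)))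

-- ===== PRECONDITION & SPEC =====
-- Pre_ excludes exactly the inputs where A raises ValueError (test_size ≤ 0 or test_size ≥ n_samples).
def Pre_optimize_time_series_split (n_samples : Int) (test_size : Int) : Prop :=
  0 < test_size ∧ test_size < n_samples
instance (n_samples : Int) (test_size : Int) : Decidable (Pre_optimize_time_series_split n_samples test_size) := by unfold Pre_optimize_time_series_split; infer_instance
def pvWitness_optimize_time_series_split : Int × Int := (10, 3)

def Spec_optimize_time_series_split (n_samples : Int) (test_size : Int) (out : Int × Option Int) : Prop := out = optimize_time_series_split_alt n_samples test_size
instance (n_samples : Int) (test_size : Int) (out : Int × Option Int) : Decidable (Spec_optimize_time_series_split n_samples test_size out) := by unfold Spec_optimize_time_series_split; infer_instance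

-- ===== CLAIM (what is proved, stated in full; the proofs are below) =====
def Claim_equal_optimize_time_series_split : Prop := ∀ (n_samples : Int) (test_size : Int), Dom_optimize_time_series_split n_samples test_size → Pre_optimize_time_series_split n_samples test_size → Spec_optimize_time_series_split n_samples test_size (optimize_time_series_split n_samples test_size)

-- ===== LEMMAS AND PROOFS =====
theorem pvAdjust_stop (n t ns mts : Int) (h : ¬ (mts ≤ 0 ∧ ns > 1)) :
    pvAdjust n t ns mts = (ns, mts) := by
  rw [pvAdjust]; simp [h]

theorem pvAdjust_step (n t ns mts : Int) (h : mts ≤ 0 ∧ ns > 1) :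
    pvAdjust n t ns mts = pvAdjust n t (ns - 1) (n - t * ((ns - 1) + 1)) := by
  rw [pvAdjust]; simp [h]

-- binary search correctness: under monotone feasibility (0 < t), with feasible lo,
-- infeasible hi, and K the largest feasible index in [lo, hi), pvBisect returns K.
theorem pvBisect_eq (n t : Int) (lo hi K : Int) (ht : 0 < t)
    (hKlo : lo ≤ K) (hKhi : K < hi)
    (hfeasK : 0 < n - t * (K + 1)) (hstop : ¬ 0 < n - t * (K + 2)) :
    pvBisect n t lo hi = K := by
  induction lo, hi using pvBisect.induct n t with
  | case1 lo hi h mid hfeas ih =>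
    rw [pvBisect]
    simp only [dif_pos h]
    have h1 := PySem.Int.floordiv_mul_add_mod (lo + hi) 2
    have h2 := PySem.Int.mod_nonneg (lo + hi) (by norm_num : (0:Int) < 2)
    have h3 := PySem.Int.mod_lt (lo + hi) (by norm_num : (0:Int) < 2)
    rw [if_pos hfeas]
    apply ih
    · -- mid ≤ K: feasible(mid) and ¬feasible(K+1), feasibility antitone in k for t > 0
      by_contra hc
      have hm : K + 1 ≤ mid := by omega
      have : t * (K + 2) ≤ t * (mid + 1) := by
        apply mul_le_mul_of_nonneg_left (by omega) (le_of_lt ht)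
      omega
    · exact hKhi
  | case2 lo hi h mid hfeas ih =>
    rw [pvBisect]
    simp only [dif_pos h]
    have h1 := PySem.Int.floordiv_mul_add_mod (lo + hi) 2
    have h2 := PySem.Int.mod_nonneg (lo + hi) (by norm_num : (0:Int) < 2)
    have h3 := PySem.Int.mod_lt (lo + hi) (by norm_num : (0:Int) < 2)
    rw [if_neg hfeas]
    apply ih
    · exact hKlo
    · -- K < mid: feasible(K), ¬feasible(mid), antitone feasibility
      by_contra hc
      have hm : mid ≤ K := by omega
      have : t * (mid + 1) ≤ t * (K + 1) := by
        apply mul_le_mul_of_nonneg_left (by omega) (le_of_lt ht)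
      omega
  | case3 lo hi h =>
    rw [pvBisect]
    simp only [dif_neg h]
    omega

-- ===== VERDICT (by name: the statement is the Claim_ definition above) =====
theorem optimize_time_series_split_spec : Claim_equal_optimize_time_series_split := by
  intro n t _ hpre
  obtain ⟨ht, htn⟩ := hpre
  unfold Spec_optimize_time_series_split optimize_time_series_split optimize_time_series_split_alt
  have hguard : ¬ (t ≤ 0 ∨ t ≥ n) := by omega
  rw [if_neg hguard, if_neg hguard]
  dsimp only
  set q := PySem.Int.floordiv (n - t) t with hq
  set r := PySem.Int.mod (n - t) t with hr
  have hqr : q * t + r = n - t := PySem.Int.floordiv_mul_add_mod (n - t) t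
  have hr0 : 0 ≤ r := PySem.Int.mod_nonneg (n - t) ht
  have hrt : r < t := PySem.Int.mod_lt (n - t) ht
  have hq0 : 0 ≤ q := by
    by_contra h
    have h1 : q ≤ -1 := by omega
    have h2 : q * t ≤ -1 * t := mul_le_mul_of_nonneg_right h1 (le_of_lt ht)
    linarith
  have hqn : q ≤ n - t := by nlinarith
  by_cases hsmall : n ≤ 2 * t
  · -- q = 0 or (q = 1 ∧ r = 0): A returns (1, none); B's search stops at K = 0
    have hK : pvBisect n t 0 n = 0 :=
      pvBisect_eq n t 0 n 0 ht (by omega) (by omega) (by omega) (by omega)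
    have hqle1 : q ≤ 1 := by nlinarith
    have hA : max q 1 = 1 := by omega
    rw [hA, pvAdjust_stop n t 1 _ (by omega), hK]
    have hle : n - t * (1 + 1) ≤ 0 := by omega
    simp
    omega
  · have hq2 : 2 * t < n := by omega
    have hq1 : 1 ≤ q := by nlinarith
    have hmax : max q 1 = q := by omega
    have hmts0 : n - t * (q + 1) = r := by nlinarith
    rw [hmax, hmts0]
    by_cases hrpos : 0 < r
    · -- r > 0: A's loop not entered → (q, r); B's K = q
      have hK : pvBisect n t 0 n = q :=
        pvBisect_eq n t 0 n q ht (by omega) (by omega) (by nlinarith) (by nlinarith)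
      rw [pvAdjust_stop n t q r (by omega), hK]
      have hqz : ¬ q = 0 := by omega
      have hrn : ¬ r ≤ 0 := by omega
      simp [hqz, hrn, hmts0]
    · have hrz : r = 0 := by omega
      have hqge2 : 2 ≤ q := by nlinarith
      -- r = 0, q ≥ 2: A's loop runs once → (q - 1, t); B's K = q - 1
      have hK : pvBisect n t 0 n = q - 1 :=
        pvBisect_eq n t 0 n (q - 1) ht (by omega) (by omega) (by nlinarith) (by nlinarith)
      have hstep := pvAdjust_step n t q r (by omega)
      have hmts1 : n - t * ((q - 1) + 1) = t := by nlinarith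
      rw [hstep, hmts1, pvAdjust_stop n t (q - 1) t (by omega), hK]
      have hqz : ¬ q - 1 = 0 := by omega
      have htn2 : ¬ t ≤ 0 := by omega
      simp [hqz, htn2]
      nlinarith
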